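-- pv_equiv track=rewrite | github.com/kevin-toles/ai-agents-microservice | src/cache/state.py | parse_cache_key
-- ===== SOURCE A (Python) =====
-- from typing import Literal
--
-- STATE_PREFIX_TEMP: Literal["temp:"] = "temp:"
--
-- STATE_PREFIX_USER: Literal["user:"] = "user:"
--
-- STATE_PREFIX_APP: Literal["app:"] = "app:"
--
-- def parse_cache_key(cache_key: str) -> tuple[str, str, str]:
--     """Parse a cache key into its components.
--
--     Args:
--         cache_key: A key built by build_cache_key()
--
--     Returns:
--         Tuple of (prefix, namespace, key)
--
--     Raises:
--         ValueError: If the cache key format is invalid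
--
--     Example:
--         >>> parse_cache_key("temp:extract_structure:chapter_1")
--         ('temp:', 'extract_structure', 'chapter_1')
--     """
--     for prefix in (STATE_PREFIX_TEMP, STATE_PREFIX_USER, STATE_PREFIX_APP):
--         if cache_key.startswith(prefix):
--             remainder = cache_key[len(prefix):]
--             parts = remainder.split(":", 1)
--             if len(parts) != 2:
--                 raise ValueError(
--                     f"Invalid cache key format: '{cache_key}'. "
--                     f"Expected format: '{{prefix}}{{namespace}}:{{key}}'"
--                 )
--             return prefix, parts[0], parts[1]
--
--     raise ValueError(
--         f"Invalid cache key prefix in '{cache_key}'. "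
--         f"Must start with 'temp:', 'user:', or 'app:'"
--     )
-- ===== SOURCE B (Python) =====
-- def parse_cache_key(cache_key: str) -> tuple[str, str, str]:
--     """Single left-to-right character scan: cut the key at its first two colons
--     with an accumulator, then validate the three pieces."""
--     pieces = []
--     cur = ""
--     for ch in cache_key:
--         if ch == ":" and len(pieces) < 2:
--             pieces.append(cur)
--             cur = ""
--         else:
--             cur += ch
--     pieces.append(cur)
--     if len(pieces) == 1 or pieces[0] not in ("temp", "user", "app"):
--         raise ValueError(
--             f"Invalid cache key prefix in '{cache_key}'. "
--             f"Must start with 'temp:', 'user:', or 'app:'"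
--         )
--     if len(pieces) == 2:
--         raise ValueError(
--             f"Invalid cache key format: '{cache_key}'. "
--             f"Expected format: '{{prefix}}{{namespace}}:{{key}}'"
--         )
--     return pieces[0] + ":", pieces[1], pieces[2]
-- ===== Notes on version B (the rewrite author's own statement) =====
-- stated objective: alternative
-- what changed: Replaces the three-iteration startswith-and-split scan with a single explicit left-to-right character scan that accumulates the key into at most three pieces cut at the first two colons, validating the pieces afterwards.
import Mathlib
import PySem

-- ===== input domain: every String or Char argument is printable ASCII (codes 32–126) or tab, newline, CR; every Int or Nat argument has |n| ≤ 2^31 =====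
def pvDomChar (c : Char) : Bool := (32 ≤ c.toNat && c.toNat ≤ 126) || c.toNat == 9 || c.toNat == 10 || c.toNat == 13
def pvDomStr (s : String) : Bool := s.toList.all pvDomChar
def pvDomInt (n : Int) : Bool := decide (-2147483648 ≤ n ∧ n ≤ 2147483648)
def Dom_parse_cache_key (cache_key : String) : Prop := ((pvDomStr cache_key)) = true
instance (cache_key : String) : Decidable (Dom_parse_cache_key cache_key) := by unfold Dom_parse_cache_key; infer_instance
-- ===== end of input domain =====

-- B replaces A's three-iteration startswith scan + split with one explicit character scan that cuts the key at its first two colons (alternative decomposition; same cost).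


-- ===== PORT A =====
-- A: for each candidate prefix, if the key starts with it, split the remainder once on ':';
-- the two raise paths return ("","","") — Pre_ excludes exactly those inputs.
def parseCacheKeyGoA (cache_key : String) : List String → String × String × String
  | [] => ("", "", "")                                   -- raise ValueError: invalid prefix
  | p :: ps =>
    if PySem.Str.startswith cache_key p then
      let remainder := PySem.Str.slice cache_key (some (PySem.Str.len p)) none
      match PySem.Str.splitMax? remainder ":" 1 with
      | some [a, b] => (p, a, b)
      | _ => ("", "", "")                                -- raise ValueError: invalid format
    else parseCacheKeyGoA cache_key ps

def parse_cache_key (cache_key : String) : String × String × String :=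
  parseCacheKeyGoA cache_key ["temp:", "user:", "app:"]

-- ===== PORT B =====
-- The for-loop of Source B: state = (pieces, cur); a ':' while fewer than two pieces exist
-- closes the current piece, every other character is appended to cur.
def pvScanB : List Char → List (List Char) → List Char → List (List Char) × List Char
  | [], pieces, cur => (pieces, cur)
  | c :: cs, pieces, cur =>
    if c = ':' ∧ pieces.length < 2 then pvScanB cs (pieces ++ [cur]) []
    else pvScanB cs pieces (cur ++ [c])

def parse_cache_key_alt (cache_key : String) : String × String × String :=
  let r := pvScanB cache_key.toList [] []
  let pieces := r.1 ++ [r.2]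
  if pieces.length = 1 ∨ ¬ (pieces.headI = "temp".toList ∨ pieces.headI = "user".toList ∨ pieces.headI = "app".toList) then
    ("", "", "")                                         -- raise ValueError: invalid prefix
  else if pieces.length = 2 then
    ("", "", "")                                         -- raise ValueError: invalid format
  else
    (String.ofList (pieces.headI ++ [':']), String.ofList (pieces.getD 1 []), String.ofList (pieces.getD 2 []))

-- ===== PRECONDITION & SPEC =====
-- Pre_ excludes exactly the inputs on which A raises ValueError: keys not starting with
-- 'temp:'/'user:'/'app:', and keys whose remainder after the prefix contains no ':'.
def Pre_parse_cache_key (cache_key : String) : Prop :=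
  (PySem.Str.startswith cache_key "temp:" ∧ PySem.Str.isIn ":" (PySem.Str.slice cache_key (some 5) none)) ∨
  (PySem.Str.startswith cache_key "user:" ∧ PySem.Str.isIn ":" (PySem.Str.slice cache_key (some 5) none)) ∨
  (PySem.Str.startswith cache_key "app:" ∧ PySem.Str.isIn ":" (PySem.Str.slice cache_key (some 4) none))
instance (cache_key : String) : Decidable (Pre_parse_cache_key cache_key) := by
  unfold Pre_parse_cache_key; infer_instance

def pvWitness_parse_cache_key : String := "temp:extract_structure:chapter_1"

def Spec_parse_cache_key (cache_key : String) (out : String × String × String) : Prop := out = parse_cache_key_alt cache_key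
instance (cache_key : String) (out : String × String × String) : Decidable (Spec_parse_cache_key cache_key out) := by unfold Spec_parse_cache_key; infer_instance

-- ===== CLAIM (what is proved, stated in full; the proofs are below) =====
def Claim_equal_parse_cache_key : Prop := ∀ (cache_key : String), Dom_parse_cache_key cache_key → Pre_parse_cache_key cache_key → Spec_parse_cache_key cache_key (parse_cache_key cache_key)

-- ===== LEMMAS AND PROOFS =====

-- splitOnMax.go with maxsplit exhausted returns the rest as the final piece.
theorem pvGoZero (fuel : Nat) (l cur : List Char) (acc : List (List Char)) :
    PySem.Chars.splitOnMax.go [':'] fuel 0 l cur acc = ((cur.reverse ++ l) :: acc).reverse := by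
  rw [PySem.Chars.splitOnMax.go.eq_def]
  cases fuel with
  | zero => simp
  | succ n => cases l with
    | nil => simp
    | cons c r => simp

-- splitOnMax.go with maxsplit 1 cuts at the first ':' (enough fuel given).
theorem pvGoOne (fuel : Nat) (l cur : List Char) (acc : List (List Char))
    (h : l.length ≤ fuel) :
    PySem.Chars.splitOnMax.go [':'] fuel 1 l cur acc =
      (match l.dropWhile (· ≠ ':') with
       | [] => ((cur.reverse ++ l) :: acc).reverse
       | _ :: rest => (rest :: (cur.reverse ++ l.takeWhile (· ≠ ':')) :: acc).reverse) := by
  induction fuel generalizing l cur acc with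
  | zero =>
    have hl : l = [] := List.length_eq_zero_iff.mp (Nat.le_zero.mp h)
    subst hl
    rw [PySem.Chars.splitOnMax.go.eq_def]
    simp
  | succ n ih =>
    cases l with
    | nil =>
      rw [PySem.Chars.splitOnMax.go.eq_def]
      simp
    | cons c r =>
      by_cases hc : c = ':'
      · subst hc
        rw [PySem.Chars.splitOnMax.go.eq_def]
        simp [List.isPrefixOf, pvGoZero]
      · have hpre : ([':'].isPrefixOf (c :: r)) = false := by
          simp [List.isPrefixOf]
          exact fun h' => hc h'.symm
        rw [PySem.Chars.splitOnMax.go.eq_def]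
        simp only [hpre, List.dropWhile_cons, List.takeWhile_cons]
        have hr : r.length ≤ n := by simpa using h
        rw [ih r (c :: cur) acc hr]
        simp [hc]

-- remainder.split(":", 1) with ':' present gives the head and the tail after the first ':'.
theorem pvSplitOnMaxColon (l : List Char) :
    PySem.Chars.splitOnMax l [':'] 1 =
      (match l.dropWhile (· ≠ ':') with
       | [] => [l]
       | _ :: rest => [l.takeWhile (· ≠ ':'), rest]) := by
  unfold PySem.Chars.splitOnMax
  rw [if_neg (by omega)]
  rw [show (1:Int).toNat = 1 from rfl]
  rw [pvGoOne _ _ _ _ (by omega)]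
  cases l.dropWhile (· ≠ ':') <;> simp

-- With two pieces already closed the scan only extends the current piece.
theorem pvScanB_two (cs : List Char) (p0 p1 cur : List Char) :
    pvScanB cs [p0, p1] cur = ([p0, p1], cur ++ cs) := by
  induction cs generalizing cur with
  | nil => simp [pvScanB]
  | cons c r ih =>
    simp only [pvScanB]
    rw [if_neg (by rintro ⟨-, h⟩; simp at h)]
    rw [ih]
    simp

-- With one piece closed the scan cuts the rest at its first ':'.
theorem pvScanB_one (cs : List Char) (p0 cur : List Char) :
    pvScanB cs [p0] cur =
      (match cs.dropWhile (· ≠ ':') with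
       | [] => ([p0], cur ++ cs)
       | _ :: rest => ([p0, cur ++ cs.takeWhile (· ≠ ':')], rest)) := by
  induction cs generalizing cur with
  | nil => simp [pvScanB]
  | cons c r ih =>
    by_cases hc : c = ':'
    · subst hc
      simp only [pvScanB]
      rw [if_pos (by simp)]
      rw [show [p0] ++ [cur] = [p0, cur] from rfl, pvScanB_two]
      simp
    · simp only [pvScanB]
      rw [if_neg (by simp [hc])]
      rw [ih]
      simp only [List.dropWhile_cons, List.takeWhile_cons]
      simp [hc, List.append_assoc]

-- One lemma per accepted prefix: both ports return (prefix, namespace, key).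
theorem pvCaseTemp (s : String) (rest : List Char)
    (hsl : s.toList = 't' :: 'e' :: 'm' :: 'p' :: ':' :: rest) (hc : ':' ∈ rest) :
    parse_cache_key s = parse_cache_key_alt s := by
  obtain ⟨d, rest2, hd⟩ : ∃ d r2, rest.dropWhile (· ≠ ':') = d :: r2 := by
    cases h : rest.dropWhile (· ≠ ':') with
    | nil =>
      rw [List.dropWhile_eq_nil_iff] at h
      exact absurd (h ':' hc) (by simp)
    | cons d r2 => exact ⟨d, r2, rfl⟩
  have hstart : PySem.Str.startswith s "temp:" = true := by
    simp [PySem.Str.startswith, PySem.Chars.startswith, hsl, List.isPrefixOf]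
  have hrem : (PySem.Str.slice s (some (PySem.Str.len "temp:")) none).toList = rest := by
    simp only [PySem.Str.len]
    simp [PySem.Str.slice, PySem.Chars.slice, hsl]
    rw [PySem.List.slice_from]
    rfl
    omega
  have hA : parse_cache_key s = ("temp:", String.ofList (rest.takeWhile (· ≠ ':')), String.ofList rest2) := by
    simp only [parse_cache_key, parseCacheKeyGoA, hstart, if_true]
    simp only [PySem.Str.splitMax?, hrem, PySem.Chars.splitMax?]
    rw [if_neg (by decide)]
    have : (":".toList) = [':'] := rfl
    rw [this, pvSplitOnMaxColon, hd]
    simp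
  have hB : parse_cache_key_alt s = ("temp:", String.ofList (rest.takeWhile (· ≠ ':')), String.ofList rest2) := by
    have hscan : pvScanB s.toList [] [] = ([['t','e','m','p'], rest.takeWhile (· ≠ ':')], rest2) := by
      rw [hsl]
      simp only [pvScanB, List.length_nil]
      rw [if_neg (by simp), if_neg (by simp), if_neg (by simp), if_neg (by simp), if_pos (by simp)]
      simp only [List.nil_append]
      rw [pvScanB_one, hd]
      simp
    simp only [parse_cache_key_alt, hscan]
    rfl
  rw [hA, hB]

theorem pvCaseUser (s : String) (rest : List Char)
    (hsl : s.toList = 'u' :: 's' :: 'e' :: 'r' :: ':' :: rest) (hc : ':' ∈ rest) :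
    parse_cache_key s = parse_cache_key_alt s := by
  obtain ⟨d, rest2, hd⟩ : ∃ d r2, rest.dropWhile (· ≠ ':') = d :: r2 := by
    cases h : rest.dropWhile (· ≠ ':') with
    | nil =>
      rw [List.dropWhile_eq_nil_iff] at h
      exact absurd (h ':' hc) (by simp)
    | cons d r2 => exact ⟨d, r2, rfl⟩
  have hstart1 : PySem.Str.startswith s "temp:" = false := by
    simp [PySem.Str.startswith, PySem.Chars.startswith, hsl, List.isPrefixOf]
  have hstart : PySem.Str.startswith s "user:" = true := by
    simp [PySem.Str.startswith, PySem.Chars.startswith, hsl, List.isPrefixOf]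
  have hrem : (PySem.Str.slice s (some (PySem.Str.len "user:")) none).toList = rest := by
    simp only [PySem.Str.len]
    simp [PySem.Str.slice, PySem.Chars.slice, hsl]
    rw [PySem.List.slice_from]
    rfl
    omega
  have hA : parse_cache_key s = ("user:", String.ofList (rest.takeWhile (· ≠ ':')), String.ofList rest2) := by
    simp only [parse_cache_key, parseCacheKeyGoA, hstart1, hstart, Bool.false_eq_true, if_false, if_true]
    simp only [PySem.Str.splitMax?, hrem, PySem.Chars.splitMax?]
    rw [if_neg (by decide)]
    have : (":".toList) = [':'] := rfl
    rw [this, pvSplitOnMaxColon, hd]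
    simp
  have hB : parse_cache_key_alt s = ("user:", String.ofList (rest.takeWhile (· ≠ ':')), String.ofList rest2) := by
    have hscan : pvScanB s.toList [] [] = ([['u','s','e','r'], rest.takeWhile (· ≠ ':')], rest2) := by
      rw [hsl]
      simp only [pvScanB, List.length_nil]
      rw [if_neg (by simp), if_neg (by simp), if_neg (by simp), if_neg (by simp), if_pos (by simp)]
      simp only [List.nil_append]
      rw [pvScanB_one, hd]
      simp
    simp only [parse_cache_key_alt, hscan]
    rfl
  rw [hA, hB]

theorem pvCaseApp (s : String) (rest : List Char)
    (hsl : s.toList = 'a' :: 'p' :: 'p' :: ':' :: rest) (hc : ':' ∈ rest) :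
    parse_cache_key s = parse_cache_key_alt s := by
  obtain ⟨d, rest2, hd⟩ : ∃ d r2, rest.dropWhile (· ≠ ':') = d :: r2 := by
    cases h : rest.dropWhile (· ≠ ':') with
    | nil =>
      rw [List.dropWhile_eq_nil_iff] at h
      exact absurd (h ':' hc) (by simp)
    | cons d r2 => exact ⟨d, r2, rfl⟩
  have hstart1 : PySem.Str.startswith s "temp:" = false := by
    simp [PySem.Str.startswith, PySem.Chars.startswith, hsl, List.isPrefixOf]
  have hstart2 : PySem.Str.startswith s "user:" = false := by
    simp [PySem.Str.startswith, PySem.Chars.startswith, hsl, List.isPrefixOf]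
  have hstart : PySem.Str.startswith s "app:" = true := by
    simp [PySem.Str.startswith, PySem.Chars.startswith, hsl, List.isPrefixOf]
  have hrem : (PySem.Str.slice s (some (PySem.Str.len "app:")) none).toList = rest := by
    simp only [PySem.Str.len, show (("app:".toList.length : Int)) = (4:Int) from rfl]
    simp [PySem.Str.slice, PySem.Chars.slice, hsl]
    rw [PySem.List.slice_from]
    rfl
    omega
  have hA : parse_cache_key s = ("app:", String.ofList (rest.takeWhile (· ≠ ':')), String.ofList rest2) := by
    simp only [parse_cache_key, parseCacheKeyGoA, hstart1, hstart2, hstart, Bool.false_eq_true, if_false, if_true]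
    simp only [PySem.Str.splitMax?, hrem, PySem.Chars.splitMax?]
    rw [if_neg (by decide)]
    have : (":".toList) = [':'] := rfl
    rw [this, pvSplitOnMaxColon, hd]
    simp
  have hB : parse_cache_key_alt s = ("app:", String.ofList (rest.takeWhile (· ≠ ':')), String.ofList rest2) := by
    have hscan : pvScanB s.toList [] [] = ([['a','p','p'], rest.takeWhile (· ≠ ':')], rest2) := by
      rw [hsl]
      simp only [pvScanB, List.length_nil]
      rw [if_neg (by simp), if_neg (by simp), if_neg (by simp), if_pos (by simp)]
      simp only [List.nil_append]
      rw [pvScanB_one, hd]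
      simp
    simp only [parse_cache_key_alt, hscan]
    rfl
  rw [hA, hB]

-- The ':'-in-remainder half of Pre_ as list membership.
theorem pvColonMem (s : String) (k : Nat) (rest : List Char)
    (hsl : s.toList.drop k = rest)
    (h : PySem.Str.isIn ":" (PySem.Str.slice s (some (k : Int)) none) = true) : ':' ∈ rest := by
  have h2 := (PySem.Str.isIn_iff_infix _ _).mp h
  have : (PySem.Str.slice s (some (k : Int)) none).toList = rest := by
    simp [PySem.Str.slice, PySem.Chars.slice]
    exact hsl
  rw [this] at h2
  exact h2.subset (by simp)

-- ===== VERDICT (by name: the statement is the Claim_ definition above) =====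
theorem parse_cache_key_spec : Claim_equal_parse_cache_key := by
  intro s _ hpre
  unfold Spec_parse_cache_key
  rcases hpre with ⟨h1, h2⟩ | ⟨h1, h2⟩ | ⟨h1, h2⟩
  · have hp : "temp:".toList <+: s.toList := by
      have := h1
      simp only [PySem.Str.startswith] at this
      exact (PySem.Chars.startswith_iff _ _).mp this
    obtain ⟨rest, hrest⟩ := hp
    have hsl : s.toList = 't' :: 'e' :: 'm' :: 'p' :: ':' :: rest := by rw [← hrest]; rfl
    have hdrop : s.toList.drop 5 = rest := by rw [hsl]; rfl
    exact (pvCaseTemp s rest hsl (pvColonMem s 5 rest hdrop (by exact_mod_cast h2)))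
  · have hp : "user:".toList <+: s.toList := by
      have := h1
      simp only [PySem.Str.startswith] at this
      exact (PySem.Chars.startswith_iff _ _).mp this
    obtain ⟨rest, hrest⟩ := hp
    have hsl : s.toList = 'u' :: 's' :: 'e' :: 'r' :: ':' :: rest := by rw [← hrest]; rfl
    have hdrop : s.toList.drop 5 = rest := by rw [hsl]; rfl
    exact (pvCaseUser s rest hsl (pvColonMem s 5 rest hdrop (by exact_mod_cast h2)))
  · have hp : "app:".toList <+: s.toList := by
      have := h1
      simp only [PySem.Str.startswith] at this
      exact (PySem.Chars.startswith_iff _ _).mp this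
    obtain ⟨rest, hrest⟩ := hp
    have hsl : s.toList = 'a' :: 'p' :: 'p' :: ':' :: rest := by rw [← hrest]; rfl
    have hdrop : s.toList.drop 4 = rest := by rw [hsl]; rfl
    exact (pvCaseApp s rest hsl (pvColonMem s 4 rest hdrop (by exact_mod_cast h2)))
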